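-- pv_equiv track=rewrite | github.com/posl/comment_recommendation | script/mod_gen/1_time/en/201_C/9.py | get_pin_count
-- ===== SOURCE A (Python) =====
-- def get_pin_count(pin):
--     if len(pin) == 4:
--         return 1
--     elif pin[0] == 'o':
--         return 10 * get_pin_count(pin[1:])
--     elif pin[0] == 'x':
--         return 9 * get_pin_count(pin[1:])
--     else:
--         return 10 * get_pin_count(pin[1:]) + 9 * get_pin_count(pin[1:])
-- ===== SOURCE B (Python) =====
-- def get_pin_count(pin):
--     result = 1
--     for c in pin[:-4]:
--         result *= 10 if c == 'o' else 9 if c == 'x' else 19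
--     return result
-- ===== Notes on version B (the rewrite author's own statement) =====
-- stated objective: faster
-- what changed: Replaces A's exponential double recursion (the else branch recomputes get_pin_count(pin[1:]) twice) by a single left-to-right pass multiplying per-character factors 10/9/19, using 10*f+9*f=19*f; intended as faster: measured 7.57x at n=16, A timed out at n=64 where B returned.
import Mathlib
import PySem

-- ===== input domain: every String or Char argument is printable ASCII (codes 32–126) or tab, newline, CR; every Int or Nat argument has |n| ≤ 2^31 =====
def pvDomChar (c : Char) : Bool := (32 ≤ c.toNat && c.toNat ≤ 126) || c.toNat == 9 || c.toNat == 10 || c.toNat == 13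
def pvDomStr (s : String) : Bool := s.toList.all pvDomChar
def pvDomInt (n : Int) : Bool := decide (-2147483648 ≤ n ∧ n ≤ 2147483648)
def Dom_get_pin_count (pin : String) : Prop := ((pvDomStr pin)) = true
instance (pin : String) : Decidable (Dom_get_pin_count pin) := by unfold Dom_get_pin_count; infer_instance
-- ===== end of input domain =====

-- B replaces A's exponential double recursion by one linear pass multiplying per-character factors (10/9/19); intended as faster (timing: 7.57x at n=16, A timed out at n=64). Equal on strings of length >= 4; A raises IndexError on shorter input (excluded by Pre_).


-- ===== PORT A =====
-- literal recursion of A over the characters; the [] case (Python's IndexError on pin[0]) is excluded by Pre_ and returns 0 here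
def getPinCountRecA (cs : List Char) : Int :=
  if cs.length == 4 then 1
  else
    match cs with
    | [] => 0
    | c :: rest =>
      if c == 'o' then 10 * getPinCountRecA rest
      else if c == 'x' then 9 * getPinCountRecA rest
      else 10 * getPinCountRecA rest + 9 * getPinCountRecA rest

def get_pin_count (pin : String) : Int := getPinCountRecA pin.toList

-- ===== PORT B =====
-- one fold over pin[:-4], multiplying the per-character factor
def get_pin_count_alt (pin : String) : Int :=
  (PySem.List.slice pin.toList none (some (-4))).foldl
    (fun r c => r * (if c == 'o' then 10 else if c == 'x' then 9 else 19)) 1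

-- ===== PRECONDITION & SPEC =====
-- Pre_ excludes strings shorter than 4 characters, on which A raises IndexError
def Pre_get_pin_count (pin : String) : Prop := 4 ≤ pin.toList.length
instance (pin : String) : Decidable (Pre_get_pin_count pin) := by unfold Pre_get_pin_count; infer_instance
def pvWitness_get_pin_count : String := "ox1234"

def Spec_get_pin_count (pin : String) (out : Int) : Prop := out = get_pin_count_alt pin
instance (pin : String) (out : Int) : Decidable (Spec_get_pin_count pin out) := by unfold Spec_get_pin_count; infer_instance

-- ===== CLAIM (what is proved, stated in full; the proofs are below) =====
def Claim_equal_get_pin_count : Prop := ∀ (pin : String), Dom_get_pin_count pin → Pre_get_pin_count pin → Spec_get_pin_count pin (get_pin_count pin)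

-- ===== LEMMAS AND PROOFS =====
def pvFactor (c : Char) : Int := if c == 'o' then 10 else if c == 'x' then 9 else 19

lemma pv_foldl_mul : ∀ (l : List Char) (a : Int),
    l.foldl (fun r c => r * pvFactor c) a = a * l.foldl (fun r c => r * pvFactor c) 1 := by
  intro l
  induction l with
  | nil => intro a; simp
  | cons c t ih =>
    intro a
    simp only [List.foldl]
    rw [ih (a * pvFactor c), ih (1 * pvFactor c)]
    ring

lemma pv_key : ∀ (cs : List Char), 4 ≤ cs.length →
    getPinCountRecA cs = (cs.take (cs.length - 4)).foldl (fun r c => r * pvFactor c) 1 := by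
  intro cs
  induction cs with
  | nil => intro h; simp at h
  | cons c rest ih =>
    intro h
    by_cases hl : (c :: rest).length = 4
    · unfold getPinCountRecA
      simp [hl]
    · have h4 : 4 ≤ rest.length := by
        simp only [List.length_cons] at h hl ⊢; omega
      have htake : (c :: rest).take ((c :: rest).length - 4)
          = c :: rest.take (rest.length - 4) := by
        simp only [List.length_cons]
        have : rest.length + 1 - 4 = (rest.length - 4) + 1 := by omega
        rw [this, List.take_succ_cons]
      rw [htake]
      simp only [List.foldl]
      rw [pv_foldl_mul (rest.take (rest.length - 4)) (1 * pvFactor c)]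
      unfold getPinCountRecA
      have hne : ((c :: rest).length == 4) = false := by
        simp only [beq_eq_false_iff_ne]; exact hl
      rw [hne]
      simp only [Bool.false_eq_true, if_false]
      rw [ih h4]
      unfold pvFactor
      by_cases ho : c = 'o'
      · simp [ho]
      · by_cases hx : c = 'x'
        · simp [hx]
        · simp only [beq_iff_eq, ho, hx, if_false]
          ring

-- ===== VERDICT (by name: the statement is the Claim_ definition above) =====
theorem get_pin_count_spec : Claim_equal_get_pin_count := by
  intro pin _ hpre
  unfold Spec_get_pin_count get_pin_count get_pin_count_alt
  rw [PySem.List.slice_to_neg_ofNat pin.toList 4 (by omega)]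
  exact pv_key pin.toList hpre
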